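-- pv_equiv track=rewrite | github.com/kirvader/fersat | main.py | get_cnf
-- ===== SOURCE A (Python) =====
-- def get_var_from_cell(i, j, n):
--     return i * n + j + 1
--
-- def get_cnf(n):
--     result_cnf = []
--     for i in range(n):
--         at_least_one = []
--         for j in range(n):
--             at_least_one.append(get_var_from_cell(i, j, n))
--         result_cnf.append(at_least_one)
--
--     for i in range(n):
--         for j in range(n):
--             for k in range(j):
--                 result_cnf.append([-get_var_from_cell(i, k, n), -get_var_from_cell(i, j, n)])
--
--     for j in range(n):
--         for i in range(n):
--             for k in range(i):
--                 result_cnf.append([-get_var_from_cell(i, j, n), -get_var_from_cell(k, j, n)])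
--
--     for s in range(2 * n - 1):
--         for i in range(n):
--             j = s - i
--             if j < 0 or j >= n:
--                 continue
--             for k in range(i):
--                 h = s - k
--                 if h < 0 or h >= n:
--                     continue
--                 result_cnf.append([-get_var_from_cell(i, j, n), -get_var_from_cell(k, h, n)])
--
--     for s in range(1 - n, n):
--         for i in range(n):
--             j = i - s
--             if j < 0 or j >= n:
--                 continue
--             for k in range(i):
--                 h = k - s
--                 if h < 0 or h >= n:
--                     continue
--                 result_cnf.append([-get_var_from_cell(i, j, n), -get_var_from_cell(k, h, n)])
--
--     return result_cnf
-- ===== SOURCE B (Python) =====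
-- def get_var_from_cell(i, j, n):
--     return i * n + j + 1
--
--
-- def get_cnf(n):
--     # One row-major sweep over the board: each cell, as it is visited, is
--     # paired with the cells already seen on its row, column, anti-diagonal
--     # and diagonal; pair clauses go into per-line buckets, concatenated
--     # line by line at the end.
--     alo = []
--     row_amo = []
--     col_amo = [[] for _ in range(n)]
--     anti_amo = [[] for _ in range(2 * n - 1)]
--     diag_amo = [[] for _ in range(2 * n - 1)]
--     col_seen = [[] for _ in range(n)]
--     anti_seen = [[] for _ in range(2 * n - 1)]
--     diag_seen = [[] for _ in range(2 * n - 1)]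
--     for i in range(n):
--         row_seen = []
--         for j in range(n):
--             v = get_var_from_cell(i, j, n)
--             for u in row_seen:
--                 row_amo.append([-u, -v])
--             row_seen.append(v)
--             s = i + j
--             d = i - j + n - 1
--             for u in col_seen[j]:
--                 col_amo[j].append([-v, -u])
--             for u in anti_seen[s]:
--                 anti_amo[s].append([-v, -u])
--             for u in diag_seen[d]:
--                 diag_amo[d].append([-v, -u])
--             col_seen[j].append(v)
--             anti_seen[s].append(v)
--             diag_seen[d].append(v)
--         alo.append(row_seen)
--     cnf = alo + row_amo
--     for buckets in (col_amo, anti_amo, diag_amo):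
--         for bucket in buckets:
--             cnf += bucket
--     return cnf
-- ===== Notes on version B (the rewrite author's own statement) =====
-- stated objective: alternative
-- what changed: B makes a single row-major sweep over the board, pairing each cell as it is visited with the cells already recorded on its row, column, anti-diagonal and diagonal (seen-lists indexed by j, i+j, i-j), collecting pair clauses into per-line buckets that are concatenated at the end, instead of A's five separate staged blocks of nested index loops with validity guards.
import Mathlib
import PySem

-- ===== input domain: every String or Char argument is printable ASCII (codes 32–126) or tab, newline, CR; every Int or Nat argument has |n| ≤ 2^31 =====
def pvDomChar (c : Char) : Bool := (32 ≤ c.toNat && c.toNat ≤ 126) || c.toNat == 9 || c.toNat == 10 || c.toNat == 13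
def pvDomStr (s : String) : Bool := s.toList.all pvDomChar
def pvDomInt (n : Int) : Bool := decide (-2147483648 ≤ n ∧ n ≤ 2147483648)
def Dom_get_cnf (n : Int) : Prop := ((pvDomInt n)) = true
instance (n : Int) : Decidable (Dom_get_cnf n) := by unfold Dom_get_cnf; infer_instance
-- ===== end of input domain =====

-- B replaces A's five staged index-loop blocks by a single row-major sweep that pairs each
-- cell with the cells already seen on its row/column/diagonals, bucketed per line (objective: alternative).

-- ===== PORT A =====
def get_var_from_cell (i j n : Int) : Int := i * n + j + 1

def get_cnf (n : Int) : List (List Int) :=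
  let r1 := (PySem.List.pyRange 0 n 1).foldl (fun acc i =>
      acc ++ [(PySem.List.pyRange 0 n 1).foldl
        (fun al j => al ++ [get_var_from_cell i j n]) []]) []
  let r2 := (PySem.List.pyRange 0 n 1).foldl (fun acc i =>
      (PySem.List.pyRange 0 n 1).foldl (fun acc j =>
        (PySem.List.pyRange 0 j 1).foldl (fun acc k =>
          acc ++ [[-get_var_from_cell i k n, -get_var_from_cell i j n]]) acc) acc) r1
  let r3 := (PySem.List.pyRange 0 n 1).foldl (fun acc j =>
      (PySem.List.pyRange 0 n 1).foldl (fun acc i =>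
        (PySem.List.pyRange 0 i 1).foldl (fun acc k =>
          acc ++ [[-get_var_from_cell i j n, -get_var_from_cell k j n]]) acc) acc) r2
  let r4 := (PySem.List.pyRange 0 (2 * n - 1) 1).foldl (fun acc s =>
      (PySem.List.pyRange 0 n 1).foldl (fun acc i =>
        let j := s - i
        if j < 0 ∨ n ≤ j then acc
        else (PySem.List.pyRange 0 i 1).foldl (fun acc k =>
          let h := s - k
          if h < 0 ∨ n ≤ h then acc
          else acc ++ [[-get_var_from_cell i j n, -get_var_from_cell k h n]]) acc) acc) r3
  let r5 := (PySem.List.pyRange (1 - n) n 1).foldl (fun acc s =>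
      (PySem.List.pyRange 0 n 1).foldl (fun acc i =>
        let j := i - s
        if j < 0 ∨ n ≤ j then acc
        else (PySem.List.pyRange 0 i 1).foldl (fun acc k =>
          let h := k - s
          if h < 0 ∨ n ≤ h then acc
          else acc ++ [[-get_var_from_cell i j n, -get_var_from_cell k h n]]) acc) acc) r4
  r5

-- ===== PORT B =====
-- sweep state: at-least-one clauses, pair-clause buckets and seen-cell lists per line
structure QState where
  alo : List (List Int)
  rowAmo : List (List Int)
  colAmo : List (List (List Int))
  antiAmo : List (List (List Int))
  diagAmo : List (List (List Int))
  colSeen : List (List Int)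
  antiSeen : List (List Int)
  diagSeen : List (List Int)
  rowSeen : List Int
deriving Repr

-- body of Source B's inner loop: visit cell (i, j)
def cellStep (n i : Int) (st : QState) (j : Int) : QState :=
  let v := get_var_from_cell i j n
  let rowAmo := st.rowAmo ++ st.rowSeen.map (fun u => [-u, -v])
  let rowSeen := st.rowSeen ++ [v]
  let s := i + j
  let d := i - j + n - 1
  let colAmo := st.colAmo.modify j.toNat (fun b => b ++ (st.colSeen.getD j.toNat []).map (fun u => [-v, -u]))
  let antiAmo := st.antiAmo.modify s.toNat (fun b => b ++ (st.antiSeen.getD s.toNat []).map (fun u => [-v, -u]))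
  let diagAmo := st.diagAmo.modify d.toNat (fun b => b ++ (st.diagSeen.getD d.toNat []).map (fun u => [-v, -u]))
  let colSeen := st.colSeen.modify j.toNat (fun b => b ++ [v])
  let antiSeen := st.antiSeen.modify s.toNat (fun b => b ++ [v])
  let diagSeen := st.diagSeen.modify d.toNat (fun b => b ++ [v])
  ⟨st.alo, rowAmo, colAmo, antiAmo, diagAmo, colSeen, antiSeen, diagSeen, rowSeen⟩

-- body of Source B's outer loop: sweep row i
def rowStep (n : Int) (st : QState) (i : Int) : QState :=
  let st1 : QState := { st with rowSeen := [] }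
  let st2 := (PySem.List.pyRange 0 n 1).foldl (cellStep n i) st1
  { st2 with alo := st2.alo ++ [st2.rowSeen] }

def get_cnf_alt (n : Int) : List (List Int) :=
  let init : QState := ⟨[], [], List.replicate n.toNat [], List.replicate (2 * n - 1).toNat [],
    List.replicate (2 * n - 1).toNat [], List.replicate n.toNat [], List.replicate (2 * n - 1).toNat [],
    List.replicate (2 * n - 1).toNat [], []⟩
  let st := (PySem.List.pyRange 0 n 1).foldl (rowStep n) init
  st.alo ++ st.rowAmo ++ st.colAmo.flatten ++ st.antiAmo.flatten ++ st.diagAmo.flatten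

-- ===== PRECONDITION & SPEC =====
def Spec_get_cnf (n : Int) (out : List (List Int)) : Prop := out = get_cnf_alt n
instance (n : Int) (out : List (List Int)) : Decidable (Spec_get_cnf n out) := by unfold Spec_get_cnf; infer_instance

-- ===== CLAIM (what is proved, stated in full; the proofs are below) =====
def Claim_equal_get_cnf : Prop := ∀ (n : Int), Dom_get_cnf n → Spec_get_cnf n (get_cnf n)

-- ===== LEMMAS AND PROOFS =====

-- clause stream of a line: for each element x (in order), one clause g x y per earlier element y
def pairsAux (g : Int → Int → List Int) (seen : List Int) : List Int → List (List Int)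
  | [] => []
  | x :: rest => seen.map (fun y => g x y) ++ pairsAux g (seen ++ [x]) rest

-- row-pair stream (earlier literal first) and column/diagonal-pair stream (later literal first)
def streamLo (l : List Int) : List (List Int) := pairsAux (fun x y => [-y, -x]) [] l
def streamHi (l : List Int) : List (List Int) := pairsAux (fun x y => [-x, -y]) [] l

theorem pairsAux_snoc (g : Int → Int → List Int) (seen l : List Int) (x : Int) :
    pairsAux g seen (l ++ [x]) = pairsAux g seen l ++ (seen ++ l).map (fun y => g x y) := by
  induction l generalizing seen with
  | nil => simp [pairsAux]
  | cons z rest ih => simp [pairsAux, ih]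

-- A's prefix double loop over the kept indices equals the clause stream of the filtered line
theorem fpairs (g : Int → Int → List Int) (p : Int → Bool) (F : Int → Int) (n : Int) :
    ((PySem.List.pyRange 0 n 1).filter p).flatMap (fun i =>
      ((PySem.List.pyRange 0 i 1).filter p).map (fun k => g (F i) (F k)))
    = pairsAux g [] (((PySem.List.pyRange 0 n 1).filter p).map F) := by
  by_cases h : n ≤ 0
  · rw [PySem.List.pyRange_one_eq_nil h]; rfl
  · obtain ⟨m, rfl⟩ : ∃ m : Nat, n = (m : Int) := ⟨n.toNat, (Int.toNat_of_nonneg (by omega)).symm⟩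
    clear h
    induction m with
    | zero => rfl
    | succ m ih =>
      have hcast : ((m + 1 : Nat) : Int) = (m : Int) + 1 := by push_cast; ring
      rw [hcast, PySem.List.pyRange_one_succ_right (by omega), List.filter_append,
        List.flatMap_append, List.map_append, ih]
      by_cases hp : p (m : Int)
      · simp only [List.filter_cons, hp, List.filter_nil, if_true]
        rw [List.map_cons, List.map_nil, pairsAux_snoc]
        congr 1
        simp only [List.flatMap_cons, List.flatMap_nil, List.append_nil, List.nil_append]
        rw [List.map_map]
        rfl
      · simp [hp]

theorem flatMap_guard (p : Int → Prop) [DecidablePred p] (g : Int → List (List Int)) (l : List Int) :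
    l.flatMap (fun x => if p x then [] else g x)
    = (l.filter (fun x => !decide (p x))).flatMap g := by
  induction l with
  | nil => rfl
  | cons y l ih => by_cases hp : p y <;> simp [hp, ih]

-- the 'continue' loop shape: skip x when p x, else extend the accumulator
theorem foldl_skip_if (p : Int → Prop) [DecidablePred p] (g : Int → List (List Int))
    (l : List Int) (acc : List (List Int)) :
    l.foldl (fun acc x => if p x then acc else acc ++ g x) acc
    = acc ++ (l.filter (fun x => !decide (p x))).flatMap g := by
  have h : ∀ (acc : List (List Int)), ∀ x ∈ l,
      (if p x then acc else acc ++ g x) = acc ++ (if p x then [] else g x) := by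
    intro acc x _
    by_cases hp : p x <;> simp [hp]
  rw [PySem.List.foldl_congr_mem l _ (fun acc x => acc ++ (if p x then [] else g x)) acc h,
    PySem.List.foldl_append_eq_flatMap, flatMap_guard]

theorem foldl_skip_if_single (p : Int → Prop) [DecidablePred p] (f : Int → List Int)
    (l : List Int) (acc : List (List Int)) :
    l.foldl (fun acc x => if p x then acc else acc ++ [f x]) acc
    = acc ++ (l.filter (fun x => !decide (p x))).map f := by
  rw [foldl_skip_if p (fun x => [f x]) l acc]
  congr 1
  induction (l.filter (fun x => !decide (p x))) with
  | nil => rfl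
  | cons y t ih => simp [ih]

theorem guard_eq (n a : Int) : (!decide (a < 0 ∨ n ≤ a)) = (decide (0 ≤ a) && decide (a < n)) := by
  rw [← decide_not, ← Bool.decide_and, decide_eq_decide]
  omega

-- ---- A-side block characterisations ----

theorem blockRows (n : Int) (acc : List (List Int)) :
    (PySem.List.pyRange 0 n 1).foldl (fun acc i =>
      acc ++ [(PySem.List.pyRange 0 n 1).foldl
        (fun al j => al ++ [get_var_from_cell i j n]) []]) acc
    = acc ++ (PySem.List.pyRange 0 n 1).map (fun i =>
        (PySem.List.pyRange 0 n 1).map (fun j => get_var_from_cell i j n)) := by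
  simp only [PySem.List.foldl_append_singleton_eq_map, List.nil_append]

theorem blockRowPairs (n : Int) (acc : List (List Int)) :
    (PySem.List.pyRange 0 n 1).foldl (fun acc i =>
      (PySem.List.pyRange 0 n 1).foldl (fun acc j =>
        (PySem.List.pyRange 0 j 1).foldl (fun acc k =>
          acc ++ [[-get_var_from_cell i k n, -get_var_from_cell i j n]]) acc) acc) acc
    = acc ++ ((PySem.List.pyRange 0 n 1).map (fun i =>
        (PySem.List.pyRange 0 n 1).map (fun j => get_var_from_cell i j n))).flatMap streamLo := by
  simp only [PySem.List.foldl_append_singleton_eq_map, PySem.List.foldl_append_eq_flatMap]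
  congr 1
  rw [List.flatMap_map]
  apply List.flatMap_congr
  intro i _
  show _ = streamLo _
  rw [streamLo]
  have h := fpairs (fun x y => [-y, -x]) (fun _ => true) (fun j => get_var_from_cell i j n) n
  simp only [List.filter_true] at h
  exact h

theorem blockColPairs (n : Int) (acc : List (List Int)) :
    (PySem.List.pyRange 0 n 1).foldl (fun acc j =>
      (PySem.List.pyRange 0 n 1).foldl (fun acc i =>
        (PySem.List.pyRange 0 i 1).foldl (fun acc k =>
          acc ++ [[-get_var_from_cell i j n, -get_var_from_cell k j n]]) acc) acc) acc
    = acc ++ ((PySem.List.pyRange 0 n 1).map (fun j =>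
        (PySem.List.pyRange 0 n 1).map (fun i => get_var_from_cell i j n))).flatMap streamHi := by
  simp only [PySem.List.foldl_append_singleton_eq_map, PySem.List.foldl_append_eq_flatMap]
  congr 1
  rw [List.flatMap_map]
  apply List.flatMap_congr
  intro j _
  show _ = streamHi _
  rw [streamHi]
  have h := fpairs (fun x y => [-x, -y]) (fun _ => true) (fun i => get_var_from_cell i j n) n
  simp only [List.filter_true] at h
  exact h

theorem blockAnti (n : Int) (acc : List (List Int)) :
    (PySem.List.pyRange 0 (2 * n - 1) 1).foldl (fun acc s =>
      (PySem.List.pyRange 0 n 1).foldl (fun acc i =>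
        if s - i < 0 ∨ n ≤ s - i then acc
        else (PySem.List.pyRange 0 i 1).foldl (fun acc k =>
          if s - k < 0 ∨ n ≤ s - k then acc
          else acc ++ [[-get_var_from_cell i (s - i) n, -get_var_from_cell k (s - k) n]]) acc) acc) acc
    = acc ++ ((PySem.List.pyRange 0 (2 * n - 1) 1).map (fun s =>
        ((PySem.List.pyRange 0 n 1).filter (fun i => decide (0 ≤ s - i) && decide (s - i < n))).map
          (fun i => get_var_from_cell i (s - i) n))).flatMap streamHi := by
  simp only [foldl_skip_if_single, foldl_skip_if, PySem.List.foldl_append_eq_flatMap]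
  congr 1
  rw [List.flatMap_map]
  apply List.flatMap_congr
  intro s _
  show _ = streamHi _
  rw [streamHi]
  have h := fpairs (fun x y => [-x, -y]) (fun x => !decide (s - x < 0 ∨ n ≤ s - x))
    (fun i => get_var_from_cell i (s - i) n) n
  rw [List.filter_congr (fun x _ => (guard_eq n (s - x)).symm)]
  exact h

theorem blockDiag (n : Int) (acc : List (List Int)) :
    (PySem.List.pyRange (1 - n) n 1).foldl (fun acc s =>
      (PySem.List.pyRange 0 n 1).foldl (fun acc i =>
        if i - s < 0 ∨ n ≤ i - s then acc
        else (PySem.List.pyRange 0 i 1).foldl (fun acc k =>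
          if k - s < 0 ∨ n ≤ k - s then acc
          else acc ++ [[-get_var_from_cell i (i - s) n, -get_var_from_cell k (k - s) n]]) acc) acc) acc
    = acc ++ ((PySem.List.pyRange (1 - n) n 1).map (fun s =>
        ((PySem.List.pyRange 0 n 1).filter (fun i => decide (0 ≤ i - s) && decide (i - s < n))).map
          (fun i => get_var_from_cell i (i - s) n))).flatMap streamHi := by
  simp only [foldl_skip_if_single, foldl_skip_if, PySem.List.foldl_append_eq_flatMap]
  congr 1
  rw [List.flatMap_map]
  apply List.flatMap_congr
  intro s _
  show _ = streamHi _
  rw [streamHi]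
  have h := fpairs (fun x y => [-x, -y]) (fun x => !decide (x - s < 0 ∨ n ≤ x - s))
    (fun i => get_var_from_cell i (i - s) n) n
  rw [List.filter_congr (fun x _ => (guard_eq n (x - s)).symm)]
  exact h

-- ---- positional bucket lemmas ----

theorem getD_map_pyRange_off {α : Type} (f : Int → α) (a b t : Int) (d : α)
    (h1 : a ≤ t) (_h2 : t < b) :
    ((PySem.List.pyRange a b 1).map f).getD (t - a).toNat d = f t := by
  have hlen : (t - a).toNat < ((PySem.List.pyRange a b 1).map f).length := by
    rw [List.length_map, PySem.List.length_pyRange_one]; omega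
  rw [List.getD_eq_getElem _ _ hlen, List.getElem_map, PySem.List.getElem_pyRange_one]
  congr 1
  omega

theorem modify_map_pyRange {α : Type} (f : Int → α) (g : α → α) (a b t : Int)
    (h1 : a ≤ t) (_h2 : t < b) :
    ((PySem.List.pyRange a b 1).map f).modify (t - a).toNat g
    = (PySem.List.pyRange a b 1).map (fun u => if u = t then g (f u) else f u) := by
  apply List.ext_getElem
  · simp [List.length_modify]
  · intro p hp hq
    rw [List.getElem_modify]
    simp only [List.getElem_map, PySem.List.getElem_pyRange_one]
    have hplen : p < (b - a).toNat := by
      simpa [List.length_map, PySem.List.length_pyRange_one] using hq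
    by_cases he : (t - a).toNat = p
    · rw [if_pos he, if_pos (by omega)]
    · rw [if_neg he, if_neg (by omega)]

theorem map_const_pyRange {α : Type} (a b : Int) (c : α) :
    (PySem.List.pyRange a b 1).map (fun _ => c) = List.replicate (b - a).toNat c := by
  rw [List.eq_replicate_iff]
  constructor
  · rw [List.length_map, PySem.List.length_pyRange_one]
  · intro x hx
    rcases List.mem_map.1 hx with ⟨u, _, h⟩
    exact h.symm

-- ---- the sweep invariant ----

def rowLineF (n i : Int) : List Int :=
  (PySem.List.pyRange 0 n 1).map (fun j => get_var_from_cell i j n)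

def colF (n i j t : Int) : List Int :=
  (PySem.List.pyRange 0 i 1).map (fun k => get_var_from_cell k t n)
  ++ (if t < j then [get_var_from_cell i t n] else [])

def antiF (n i j s : Int) : List Int :=
  ((PySem.List.pyRange 0 i 1).filter (fun k => decide (0 ≤ s - k) && decide (s - k < n))).map
    (fun k => get_var_from_cell k (s - k) n)
  ++ (if 0 ≤ s - i ∧ s - i < n ∧ s - i < j then [get_var_from_cell i (s - i) n] else [])

def diagF (n i j s : Int) : List Int :=
  ((PySem.List.pyRange 0 i 1).filter (fun k => decide (0 ≤ k - s) && decide (k - s < n))).map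
    (fun k => get_var_from_cell k (k - s) n)
  ++ (if 0 ≤ i - s ∧ i - s < n ∧ i - s < j then [get_var_from_cell i (i - s) n] else [])

-- ---- pointwise line evolutions ----

theorem colF_cell_self (n i j : Int) :
    colF n i j j ++ [get_var_from_cell i j n] = colF n i (j + 1) j := by
  rw [colF, colF, if_neg (lt_irrefl j), if_pos (by omega)]
  simp

theorem colF_cell_ne (n i j t : Int) (hne : t ≠ j) : colF n i j t = colF n i (j + 1) t := by
  rw [colF, colF]
  congr 1
  exact if_congr (by omega) rfl rfl

theorem antiF_cell_self (n i j : Int) (hj : 0 ≤ j) (hj2 : j < n) :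
    antiF n i j (i + j) ++ [get_var_from_cell i j n] = antiF n i (j + 1) (i + j) := by
  rw [antiF, antiF, if_neg (by omega), if_pos (by refine ⟨by omega, by omega, by omega⟩)]
  simp [show i + j - i = j from by ring]

theorem antiF_cell_ne (n i j s : Int) (hne : s ≠ i + j) : antiF n i j s = antiF n i (j + 1) s := by
  rw [antiF, antiF]
  congr 1
  exact if_congr (by omega) rfl rfl

theorem diagF_cell_self (n i j : Int) (hj : 0 ≤ j) (hj2 : j < n) :
    diagF n i j (i - j) ++ [get_var_from_cell i j n] = diagF n i (j + 1) (i - j) := by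
  rw [diagF, diagF, if_neg (by omega), if_pos (by refine ⟨by omega, by omega, by omega⟩)]
  simp [show i - (i - j) = j from by ring]

theorem diagF_cell_ne (n i j s : Int) (hne : s ≠ i - j) : diagF n i j s = diagF n i (j + 1) s := by
  rw [diagF, diagF]
  congr 1
  exact if_congr (by omega) rfl rfl

theorem colF_row (n i t : Int) (hi : 0 ≤ i) (ht : 0 ≤ t) (ht2 : t < n) :
    colF n i n t = colF n (i + 1) 0 t := by
  rw [colF, colF, if_pos ht2, if_neg (by omega)]
  rw [PySem.List.pyRange_one_succ_right hi, List.map_append]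
  simp

theorem antiF_row (n i s : Int) (hi : 0 ≤ i) : antiF n i n s = antiF n (i + 1) 0 s := by
  rw [antiF, antiF,
    if_neg (show ¬(0 ≤ s - (i + 1) ∧ s - (i + 1) < n ∧ s - (i + 1) < 0) from by omega),
    List.append_nil, PySem.List.pyRange_one_succ_right hi, List.filter_append, List.map_append]
  congr 1
  by_cases hc : 0 ≤ s - i ∧ s - i < n
  · rw [if_pos ⟨hc.1, hc.2, hc.2⟩]
    simp [hc.2, show i ≤ s from by omega]
  · rw [if_neg (fun h => hc ⟨h.1, h.2.1⟩)]
    simp only [List.filter_cons, List.filter_nil]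
    rw [if_neg (by simp only [Bool.and_eq_true, decide_eq_true_eq]; omega)]
    simp

theorem diagF_row (n i s : Int) (hi : 0 ≤ i) : diagF n i n s = diagF n (i + 1) 0 s := by
  rw [diagF, diagF,
    if_neg (show ¬(0 ≤ i + 1 - s ∧ i + 1 - s < n ∧ i + 1 - s < 0) from by omega),
    List.append_nil, PySem.List.pyRange_one_succ_right hi, List.filter_append, List.map_append]
  congr 1
  by_cases hc : 0 ≤ i - s ∧ i - s < n
  · rw [if_pos ⟨hc.1, hc.2, hc.2⟩]
    simp [hc.2, show s ≤ i from by omega]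
  · rw [if_neg (fun h => hc ⟨h.1, h.2.1⟩)]
    simp only [List.filter_cons, List.filter_nil]
    rw [if_neg (by simp only [Bool.and_eq_true, decide_eq_true_eq]; omega)]
    simp

-- a = 0 / shifted specialisations of the positional lemmas
theorem getD_map_pyRange0 {α : Type} (f : Int → α) (b t : Int) (d : α)
    (h1 : 0 ≤ t) (h2 : t < b) :
    ((PySem.List.pyRange 0 b 1).map f).getD t.toNat d = f t := by
  have h := getD_map_pyRange_off f 0 b t d h1 h2
  simpa using h

theorem modify_map_pyRange0 {α : Type} (f : Int → α) (g : α → α) (b t : Int)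
    (h1 : 0 ≤ t) (h2 : t < b) :
    ((PySem.List.pyRange 0 b 1).map f).modify t.toNat g
    = (PySem.List.pyRange 0 b 1).map (fun u => if u = t then g (f u) else f u) := by
  have h := modify_map_pyRange f g 0 b t h1 h2
  simpa using h

-- state of the sweep just before visiting cell (i, j)
def SweepInv (n i j : Int) (st : QState) : Prop :=
  st.alo = (PySem.List.pyRange 0 i 1).map (rowLineF n) ∧
  st.rowSeen = (PySem.List.pyRange 0 j 1).map (fun t => get_var_from_cell i t n) ∧
  st.rowAmo = ((PySem.List.pyRange 0 i 1).map (rowLineF n)).flatMap streamLo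
    ++ streamLo ((PySem.List.pyRange 0 j 1).map (fun t => get_var_from_cell i t n)) ∧
  st.colSeen = (PySem.List.pyRange 0 n 1).map (colF n i j) ∧
  st.colAmo = (PySem.List.pyRange 0 n 1).map (fun t => streamHi (colF n i j t)) ∧
  st.antiSeen = (PySem.List.pyRange 0 (2 * n - 1) 1).map (antiF n i j) ∧
  st.antiAmo = (PySem.List.pyRange 0 (2 * n - 1) 1).map (fun s => streamHi (antiF n i j s)) ∧
  st.diagSeen = (PySem.List.pyRange (1 - n) n 1).map (diagF n i j) ∧
  st.diagAmo = (PySem.List.pyRange (1 - n) n 1).map (fun s => streamHi (diagF n i j s))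

-- state between rows (rowSeen / partial row stream not constrained)
def SweepInvO (n i : Int) (st : QState) : Prop :=
  st.alo = (PySem.List.pyRange 0 i 1).map (rowLineF n) ∧
  st.rowAmo = ((PySem.List.pyRange 0 i 1).map (rowLineF n)).flatMap streamLo ∧
  st.colSeen = (PySem.List.pyRange 0 n 1).map (colF n i 0) ∧
  st.colAmo = (PySem.List.pyRange 0 n 1).map (fun t => streamHi (colF n i 0 t)) ∧
  st.antiSeen = (PySem.List.pyRange 0 (2 * n - 1) 1).map (antiF n i 0) ∧
  st.antiAmo = (PySem.List.pyRange 0 (2 * n - 1) 1).map (fun s => streamHi (antiF n i 0 s)) ∧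
  st.diagSeen = (PySem.List.pyRange (1 - n) n 1).map (diagF n i 0) ∧
  st.diagAmo = (PySem.List.pyRange (1 - n) n 1).map (fun s => streamHi (diagF n i 0 s))

theorem cellStep_inv (n i j : Int) (hi : 0 ≤ i) (hi2 : i < n) (hj : 0 ≤ j) (hj2 : j < n)
    (st : QState) (h : SweepInv n i j st) : SweepInv n i (j + 1) (cellStep n i st j) := by
  obtain ⟨h1, h2, h3, h4, h5, h6, h7, h8, h9⟩ := h
  have hanti : 0 ≤ i + j ∧ i + j < 2 * n - 1 := ⟨by omega, by omega⟩
  have hdiag : 1 - n ≤ i - j ∧ i - j < n := ⟨by omega, by omega⟩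
  have ed : i - j + n - 1 = (i - j) - (1 - n) := by ring
  refine ⟨?_, ?_, ?_, ?_, ?_, ?_, ?_, ?_, ?_⟩
  · -- alo
    simpa [cellStep] using h1
  · -- rowSeen
    simp only [cellStep]
    rw [h2, PySem.List.pyRange_one_succ_right hj, List.map_append]
    simp
  · -- rowAmo
    simp only [cellStep]
    rw [h3, h2, PySem.List.pyRange_one_succ_right hj, List.map_append, List.map_singleton]
    simp only [streamLo]
    rw [pairsAux_snoc]
    simp [List.append_assoc]
  · -- colSeen
    simp only [cellStep]
    rw [h4, modify_map_pyRange0 _ _ n j hj hj2]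
    apply List.map_congr_left
    intro t ht
    rw [PySem.List.mem_pyRange_one] at ht
    by_cases he : t = j
    · subst he
      rw [if_pos rfl, colF_cell_self]
    · rw [if_neg he, colF_cell_ne n i j t he]
  · -- colAmo
    simp only [cellStep]
    rw [h5, h4, getD_map_pyRange0 _ n j _ hj hj2, modify_map_pyRange0 _ _ n j hj hj2]
    apply List.map_congr_left
    intro t ht
    rw [PySem.List.mem_pyRange_one] at ht
    by_cases he : t = j
    · subst he
      rw [if_pos rfl, ← colF_cell_self n i t, streamHi, streamHi, pairsAux_snoc]
      simp
    · rw [if_neg he, colF_cell_ne n i j t he]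
  · -- antiSeen
    simp only [cellStep]
    rw [h6, modify_map_pyRange0 _ _ (2 * n - 1) (i + j) hanti.1 hanti.2]
    apply List.map_congr_left
    intro s hs
    rw [PySem.List.mem_pyRange_one] at hs
    by_cases he : s = i + j
    · subst he
      rw [if_pos rfl, antiF_cell_self n i j hj hj2]
    · rw [if_neg he, antiF_cell_ne n i j s he]
  · -- antiAmo
    simp only [cellStep]
    rw [h7, h6, getD_map_pyRange0 _ (2 * n - 1) (i + j) _ hanti.1 hanti.2,
      modify_map_pyRange0 _ _ (2 * n - 1) (i + j) hanti.1 hanti.2]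
    apply List.map_congr_left
    intro s hs
    rw [PySem.List.mem_pyRange_one] at hs
    by_cases he : s = i + j
    · subst he
      rw [if_pos rfl, ← antiF_cell_self n i j hj hj2, streamHi, streamHi, pairsAux_snoc]
      simp
    · rw [if_neg he, antiF_cell_ne n i j s he]
  · -- diagSeen
    simp only [cellStep]
    rw [h8, ed, modify_map_pyRange _ _ (1 - n) n (i - j) hdiag.1 hdiag.2]
    apply List.map_congr_left
    intro s hs
    rw [PySem.List.mem_pyRange_one] at hs
    by_cases he : s = i - j
    · subst he
      rw [if_pos rfl, diagF_cell_self n i j hj hj2]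
    · rw [if_neg he, diagF_cell_ne n i j s he]
  · -- diagAmo
    simp only [cellStep]
    rw [h9, h8, ed, getD_map_pyRange_off _ (1 - n) n (i - j) _ hdiag.1 hdiag.2,
      modify_map_pyRange _ _ (1 - n) n (i - j) hdiag.1 hdiag.2]
    apply List.map_congr_left
    intro s hs
    rw [PySem.List.mem_pyRange_one] at hs
    by_cases he : s = i - j
    · subst he
      rw [if_pos rfl, ← diagF_cell_self n i j hj hj2, streamHi, streamHi, pairsAux_snoc]
      simp
    · rw [if_neg he, diagF_cell_ne n i j s he]

theorem fold_cellStep_aux (n i : Int) (hi : 0 ≤ i) (hi2 : i < n) (st : QState)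
    (h : SweepInv n i 0 st) (m : Nat) (hm : (m : Int) ≤ n) :
    SweepInv n i (m : Int) ((PySem.List.pyRange 0 (m : Int) 1).foldl (cellStep n i) st) := by
  induction m with
  | zero => simpa [PySem.List.pyRange_one_eq_nil] using h
  | succ m ih =>
    have hcast : ((m + 1 : Nat) : Int) = (m : Int) + 1 := by push_cast; ring
    rw [hcast, PySem.List.pyRange_one_succ_right (by positivity), List.foldl_append]
    simp only [List.foldl_cons, List.foldl_nil]
    exact cellStep_inv n i m hi hi2 (by positivity) (by omega) _ (ih (by omega))

theorem rowStep_inv (n i : Int) (hi : 0 ≤ i) (hi2 : i < n) (st : QState)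
    (h : SweepInvO n i st) : SweepInvO n (i + 1) (rowStep n st i) := by
  obtain ⟨h1, h3, h4, h5, h6, h7, h8, h9⟩ := h
  have hstart : SweepInv n i 0 ({ st with rowSeen := [] }) := by
    refine ⟨h1, by simp [PySem.List.pyRange_one_eq_nil], ?_, h4, h5, h6, h7, h8, h9⟩
    simp [PySem.List.pyRange_one_eq_nil, streamLo, pairsAux, h3]
  have hn : (n.toNat : Int) = n := Int.toNat_of_nonneg (by omega)
  have hfold := fold_cellStep_aux n i hi hi2 _ hstart n.toNat (by omega)
  rw [hn] at hfold
  obtain ⟨g1, g2, g3, g4, g5, g6, g7, g8, g9⟩ := hfold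
  refine ⟨?_, ?_, ?_, ?_, ?_, ?_, ?_, ?_⟩
  · -- alo
    simp only [rowStep]
    rw [g1, g2, PySem.List.pyRange_one_succ_right hi, List.map_append, List.map_singleton]
    rfl
  · -- rowAmo
    simp only [rowStep]
    rw [g3, PySem.List.pyRange_one_succ_right hi, List.map_append, List.map_singleton,
      List.flatMap_append]
    simp only [List.flatMap_cons, List.flatMap_nil, List.append_nil]
    rfl
  · -- colSeen
    simp only [rowStep]
    rw [g4]
    apply List.map_congr_left
    intro t ht
    rw [PySem.List.mem_pyRange_one] at ht
    exact colF_row n i t hi ht.1 ht.2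
  · -- colAmo
    simp only [rowStep]
    rw [g5]
    apply List.map_congr_left
    intro t ht
    rw [PySem.List.mem_pyRange_one] at ht
    rw [colF_row n i t hi ht.1 ht.2]
  · -- antiSeen
    simp only [rowStep]
    rw [g6]
    exact List.map_congr_left (fun s _ => antiF_row n i s hi)
  · -- antiAmo
    simp only [rowStep]
    rw [g7]
    exact List.map_congr_left (fun s _ => by rw [antiF_row n i s hi])
  · -- diagSeen
    simp only [rowStep]
    rw [g8]
    exact List.map_congr_left (fun s _ => diagF_row n i s hi)
  · -- diagAmo
    simp only [rowStep]
    rw [g9]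
    exact List.map_congr_left (fun s _ => by rw [diagF_row n i s hi])

theorem init_inv (n : Int) :
    SweepInvO n 0 ⟨[], [], List.replicate n.toNat [], List.replicate (2 * n - 1).toNat [],
      List.replicate (2 * n - 1).toNat [], List.replicate n.toNat [],
      List.replicate (2 * n - 1).toNat [], List.replicate (2 * n - 1).toNat [], []⟩ := by
  have hcol : ∀ t ∈ PySem.List.pyRange 0 n 1, colF n 0 0 t = [] := by
    intro t ht
    rw [PySem.List.mem_pyRange_one] at ht
    simp [colF, PySem.List.pyRange_one_eq_nil, if_neg (by omega : ¬ t < 0)]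
  have hanti : ∀ s ∈ PySem.List.pyRange 0 (2 * n - 1) 1, antiF n 0 0 s = [] := by
    intro s hs
    rw [antiF, PySem.List.pyRange_one_eq_nil (le_refl 0), if_neg (by omega)]
    simp
  have hdiag : ∀ s ∈ PySem.List.pyRange (1 - n) n 1, diagF n 0 0 s = [] := by
    intro s hs
    rw [diagF, PySem.List.pyRange_one_eq_nil (le_refl 0), if_neg (by omega)]
    simp
  have e1 : ((n : Int) - 0).toNat = n.toNat := by omega
  have e2 : ((2 * n - 1 : Int) - 0).toNat = (2 * n - 1).toNat := by omega
  have e3 : ((n : Int) - (1 - n)).toNat = (2 * n - 1).toNat := by omega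
  refine ⟨by simp [PySem.List.pyRange_one_eq_nil], ?_, ?_, ?_, ?_, ?_, ?_, ?_⟩
  · simp [PySem.List.pyRange_one_eq_nil]
  · rw [List.map_congr_left hcol, map_const_pyRange, e1]
  · rw [List.map_congr_left (fun t ht => by rw [hcol t ht] : ∀ t ∈ PySem.List.pyRange 0 n 1,
      streamHi (colF n 0 0 t) = streamHi []), map_const_pyRange, e1]
    rfl
  · rw [List.map_congr_left hanti, map_const_pyRange, e2]
  · rw [List.map_congr_left (fun s hs => by rw [hanti s hs] : ∀ s ∈ PySem.List.pyRange 0 (2 * n - 1) 1,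
      streamHi (antiF n 0 0 s) = streamHi []), map_const_pyRange, e2]
    rfl
  · rw [List.map_congr_left hdiag, map_const_pyRange, e3]
  · rw [List.map_congr_left (fun s hs => by rw [hdiag s hs] : ∀ s ∈ PySem.List.pyRange (1 - n) n 1,
      streamHi (diagF n 0 0 s) = streamHi []), map_const_pyRange, e3]
    rfl

theorem fold_rowStep_aux (n : Int) (st : QState) (h : SweepInvO n 0 st)
    (m : Nat) (hm : (m : Int) ≤ n) :
    SweepInvO n (m : Int) ((PySem.List.pyRange 0 (m : Int) 1).foldl (rowStep n) st) := by
  induction m with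
  | zero => simpa [PySem.List.pyRange_one_eq_nil] using h
  | succ m ih =>
    have hcast : ((m + 1 : Nat) : Int) = (m : Int) + 1 := by push_cast; ring
    rw [hcast, PySem.List.pyRange_one_succ_right (by positivity), List.foldl_append]
    simp only [List.foldl_cons, List.foldl_nil]
    exact rowStep_inv n m (by positivity) (by omega) _ (ih (by omega))

-- ===== VERDICT (by name: the statement is the Claim_ definition above) =====
theorem get_cnf_spec : Claim_equal_get_cnf := by
  intro n _
  show get_cnf n = get_cnf_alt n
  by_cases hn : n ≤ 0
  · have h1 : PySem.List.pyRange 0 n 1 = [] := PySem.List.pyRange_one_eq_nil hn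
    have h2 : PySem.List.pyRange 0 (2 * n - 1) 1 = [] := PySem.List.pyRange_one_eq_nil (by omega)
    have h3 : PySem.List.pyRange (1 - n) n 1 = [] := PySem.List.pyRange_one_eq_nil (by omega)
    have h4 : n.toNat = 0 := by omega
    have h5 : (2 * n - 1).toNat = 0 := by omega
    simp [get_cnf, get_cnf_alt, h1, h2, h3, h4, h5]
  · have hn0 : 0 ≤ n := by omega
    have hcastn : (n.toNat : Int) = n := Int.toNat_of_nonneg hn0
    have hfold := fold_rowStep_aux n _ (init_inv n) n.toNat (by omega)
    rw [hcastn] at hfold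
    obtain ⟨g1, g3, g4, g5, g6, g7, g8, g9⟩ := hfold
    rw [get_cnf]
    rw [blockRows, blockRowPairs, blockColPairs, blockAnti, blockDiag]
    rw [get_cnf_alt]
    rw [g1, g3, g5, g7, g9]
    have hc1 : (PySem.List.pyRange 0 n 1).map (fun t => streamHi (colF n n 0 t))
        = (PySem.List.pyRange 0 n 1).map (fun j =>
            streamHi ((PySem.List.pyRange 0 n 1).map (fun i => get_var_from_cell i j n))) := by
      apply List.map_congr_left
      intro t ht
      rw [PySem.List.mem_pyRange_one] at ht
      rw [colF, if_neg (by omega)]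
      simp
    have hc2 : (PySem.List.pyRange 0 (2 * n - 1) 1).map (fun s => streamHi (antiF n n 0 s))
        = (PySem.List.pyRange 0 (2 * n - 1) 1).map (fun s =>
            streamHi (((PySem.List.pyRange 0 n 1).filter
              (fun i => decide (0 ≤ s - i) && decide (s - i < n))).map
                (fun i => get_var_from_cell i (s - i) n))) := by
      apply List.map_congr_left
      intro s _
      rw [antiF, if_neg (by omega)]
      simp
    have hc3 : (PySem.List.pyRange (1 - n) n 1).map (fun s => streamHi (diagF n n 0 s))
        = (PySem.List.pyRange (1 - n) n 1).map (fun s =>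
            streamHi (((PySem.List.pyRange 0 n 1).filter
              (fun i => decide (0 ≤ i - s) && decide (i - s < n))).map
                (fun i => get_var_from_cell i (i - s) n))) := by
      apply List.map_congr_left
      intro s _
      rw [diagF, if_neg (by omega)]
      simp
    rw [hc1, hc2, hc3]
    simp only [← List.flatMap_def, List.flatMap_map, rowLineF, List.nil_append,
      List.append_assoc]
    congr 1
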